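-- pv_equiv track=rewrite | github.com/ColeridgeGuo/leetcode | LC_532/K-diff Pairs in an Array.py | findPairs_2
-- ===== SOURCE A (Python) =====
-- from typing import List
--
-- def findPairs_2(nums: List[int], k: int) -> int:
--     """
--     Time Complexity: O(2n) = O(n)
--     Space Complexity: O(n)
--     """
--     from collections import Counter
--     result = 0
--     counter = Counter(nums)
--     for x in counter:
--         if k > 0 and x + k in counter:
--             result += 1
--         elif k == 0 and counter[x] > 1:
--             result += 1
--     return result
-- ===== SOURCE B (Python) =====
-- def findPairs_2(nums, k):
--     if k < 0:
--         return 0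
--     seen = set()
--     pairs = set()
--     for x in nums:
--         if x - k in seen:
--             pairs.add(x - k)
--         if x + k in seen:
--             pairs.add(x)
--         seen.add(x)
--     return len(pairs)
-- ===== Notes on version B (the rewrite author's own statement) =====
-- stated objective: alternative
-- what changed: Replaces A's Counter-then-scan-of-keys (two passes, with a per-key membership test or count lookup) by the classic single streaming pass that maintains a 'seen' set and a set of lower pair endpoints, returning the size of the latter; the Counter and its key loop disappear.
import Mathlib
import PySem

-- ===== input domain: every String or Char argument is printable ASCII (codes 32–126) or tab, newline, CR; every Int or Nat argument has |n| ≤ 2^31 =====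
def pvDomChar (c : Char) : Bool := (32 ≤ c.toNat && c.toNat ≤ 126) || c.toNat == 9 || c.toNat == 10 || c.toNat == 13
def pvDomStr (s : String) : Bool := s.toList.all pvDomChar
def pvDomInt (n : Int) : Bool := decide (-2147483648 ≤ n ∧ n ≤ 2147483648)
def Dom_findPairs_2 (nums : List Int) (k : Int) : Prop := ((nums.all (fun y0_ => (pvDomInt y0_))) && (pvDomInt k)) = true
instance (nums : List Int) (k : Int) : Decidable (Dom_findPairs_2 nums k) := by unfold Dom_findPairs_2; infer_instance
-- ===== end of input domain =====

-- B replaces A's Counter-then-key-scan by a single streaming pass with a 'seen' set and a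
-- set of lower pair endpoints (objective: alternative, same O(n) cost).

-- ===== PORT A =====
-- literal port of A: counter = Counter(nums); for x in counter: if k>0 and x+k in counter … elif k==0 and counter[x]>1 …
def findPairs_2 (nums : List Int) (k : Int) : Int :=
  let counter := PySem.Dict.counter nums
  counter.keys.foldl (fun result x =>
    if k > 0 ∧ counter.contains (x + k) then result + 1
    else if k = 0 ∧ counter.getD x 0 > 1 then result + 1
    else result) 0

-- ===== PORT B =====
-- loop body of Source B: check x-k then x+k against 'seen' (adding to 'pairs'), then add x to 'seen'
def pvStep (k : Int) (st : PySem.Set Int × PySem.Set Int) (x : Int) : PySem.Set Int × PySem.Set Int :=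
  (PySem.Set.add st.1 x,
    if PySem.Set.contains st.1 (x + k) then
      PySem.Set.add (if PySem.Set.contains st.1 (x - k) then PySem.Set.add st.2 (x - k) else st.2) x
    else if PySem.Set.contains st.1 (x - k) then PySem.Set.add st.2 (x - k) else st.2)

def findPairs_2_alt (nums : List Int) (k : Int) : Int :=
  if k < 0 then 0
  else PySem.Set.len (nums.foldl (pvStep k) (PySem.Set.empty, PySem.Set.empty)).2

-- ===== PRECONDITION & SPEC =====
def Spec_findPairs_2 (nums : List Int) (k : Int) (out : Int) : Prop := out = findPairs_2_alt nums k
instance (nums : List Int) (k : Int) (out : Int) : Decidable (Spec_findPairs_2 nums k out) := by unfold Spec_findPairs_2; infer_instance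

-- ===== CLAIM (what is proved, stated in full; the proofs are below) =====
def Claim_equal_findPairs_2 : Prop := ∀ (nums : List Int) (k : Int), Dom_findPairs_2 nums k → Spec_findPairs_2 nums k (findPairs_2 nums k)

-- ===== LEMMAS AND PROOFS =====

-- A's loop counts the distinct values satisfying its (k>0 / k==0) condition
lemma findPairs_2_eq_countP (nums : List Int) (k : Int) :
    findPairs_2 nums k =
      ((PySem.Set.ofList nums).countP
        (fun y => decide ((0 < k ∧ y + k ∈ nums) ∨ (k = 0 ∧ 2 ≤ nums.count y))) : Int) := by
  simp only [findPairs_2]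
  rw [show (fun result x =>
        if k > 0 ∧ (PySem.Dict.counter nums).contains (x + k) then result + 1
        else if k = 0 ∧ (PySem.Dict.counter nums).getD x 0 > 1 then result + 1
        else result)
      = (fun (result : Int) (x : Int) =>
        if (fun y => decide ((0 < k ∧ y + k ∈ nums) ∨ (k = 0 ∧ 2 ≤ nums.count y))) x
        then result + 1 else result) from ?_,
     PySem.Dict.keys_counter, PySem.List.foldl_count_if]
  · simp
  · funext result x
    rw [PySem.Dict.contains_counter, PySem.Dict.getD_counter]
    simp only [List.contains_iff_mem, decide_eq_true_eq]
    by_cases c1 : k > 0 ∧ x + k ∈ nums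
    · rw [if_pos c1, if_pos (Or.inl ⟨c1.1, c1.2⟩)]
    · rw [if_neg c1]
      by_cases c2 : k = 0 ∧ ((List.count x nums : Int) > 1)
      · rw [if_pos c2, if_pos (Or.inr ⟨c2.1, by omega⟩)]
      · rw [if_neg c2, if_neg ?_]
        rintro (h | h)
        · exact c1 ⟨h.1, h.2⟩
        · exact c2 ⟨h.1, by omega⟩

-- B's 'seen' component just accumulates the scanned elements
lemma pv_fst_fold (k : Int) (l : List Int) :
    ∀ st : PySem.Set Int × PySem.Set Int, (l.foldl (pvStep k) st).1 = PySem.Set.update st.1 l := by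
  induction l with
  | nil => intro st; simp [PySem.Set.update]
  | cons x t ih => intro st; rw [List.foldl_cons, ih, PySem.Set.update_cons]; rfl

-- B's pairs set stays duplicate-free through the loop
lemma pv_pairs_nodup (k : Int) (l : List Int) :
    ∀ st : PySem.Set Int × PySem.Set Int, st.2.Nodup → (l.foldl (pvStep k) st).2.Nodup := by
  induction l with
  | nil => intro st h; simpa using h
  | cons x t ih =>
    intro st h
    rw [List.foldl_cons]
    apply ih
    simp only [pvStep]
    split_ifs <;> first
      | exact PySem.Set.nodup_add _ _ (PySem.Set.nodup_add _ _ h)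
      | exact PySem.Set.nodup_add _ _ h
      | exact h

-- membership in B's pairs set for k > 0: exactly the lower endpoints of k-diff pairs
lemma pv_mem_pairs_pos (k : Int) (hk : 0 < k) (l : List Int) (y : Int) :
    y ∈ (l.foldl (pvStep k) (PySem.Set.empty, PySem.Set.empty)).2 ↔ y ∈ l ∧ y + k ∈ l := by
  induction l using List.reverseRecOn with
  | nil => simp [PySem.Set.empty]
  | append_singleton p x ih =>
    rw [List.foldl_append, List.foldl_cons, List.foldl_nil]
    have hfst : (p.foldl (pvStep k) (PySem.Set.empty, PySem.Set.empty)).1 = PySem.Set.ofList p := by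
      rw [pv_fst_fold]; exact PySem.Set.update_nil_left p
    simp only [pvStep, hfst, PySem.Set.contains_iff, PySem.Set.mem_ofList, List.mem_append,
      List.mem_singleton]
    have h1 : (y = x - k) ↔ (y + k = x) := by omega
    have h4 : y = x → ¬ (y + k = x) := by omega
    split_ifs with hc1 hc2 hc2
    · have e1 : y + k = x → y ∈ p := fun e => by
        rw [show y = x - k from by omega]; exact hc2
      have e2 : y = x → y + k ∈ p := fun e => by subst e; exact hc1
      simp only [PySem.Set.mem_add, ih, h1]
      clear ih hfst hc1 hc2 h1 hk
      tauto
    · have e2 : y = x → y + k ∈ p := fun e => by subst e; exact hc1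
      have e3 : y + k = x → y ∉ p := fun e => by
        rw [show y = x - k from by omega]; exact hc2
      simp only [PySem.Set.mem_add, ih]
      clear ih hfst hc1 hc2 h1 hk
      tauto
    · have e1 : y + k = x → y ∈ p := fun e => by
        rw [show y = x - k from by omega]; exact hc2
      have e5 : y = x → y + k ∉ p := fun e => by subst e; exact hc1
      simp only [PySem.Set.mem_add, ih, h1]
      clear ih hfst hc1 hc2 h1 hk
      tauto
    · have e3 : y + k = x → y ∉ p := fun e => by
        rw [show y = x - k from by omega]; exact hc2
      have e5 : y = x → y + k ∉ p := fun e => by subst e; exact hc1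
      simp only [ih]
      clear ih hfst hc1 hc2 h1 hk
      tauto

-- membership in B's pairs set for k = 0: exactly the values occurring at least twice
lemma pv_mem_pairs_zero (l : List Int) (y : Int) :
    y ∈ (l.foldl (pvStep 0) (PySem.Set.empty, PySem.Set.empty)).2 ↔ 2 ≤ l.count y := by
  induction l using List.reverseRecOn with
  | nil => simp [PySem.Set.empty]
  | append_singleton p x ih =>
    rw [List.foldl_append, List.foldl_cons, List.foldl_nil]
    have hfst : (p.foldl (pvStep 0) (PySem.Set.empty, PySem.Set.empty)).1 = PySem.Set.ofList p := by
      rw [pv_fst_fold]; exact PySem.Set.update_nil_left p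
    simp only [pvStep, hfst, add_zero, sub_zero, PySem.Set.contains_iff, PySem.Set.mem_ofList]
    rw [List.count_append]
    by_cases hyx : y = x
    · subst hyx
      have hc1 : List.count y [y] = 1 := by simp
      split_ifs with hc
      · have h1 : 1 ≤ p.count y := List.one_le_count_iff.2 hc
        simp only [PySem.Set.mem_add, ih, hc1]
        constructor
        · intro _; omega
        · intro _; exact Or.inr trivial
      · have h0 : p.count y = 0 := List.count_eq_zero.2 hc
        simp only [ih, hc1]
        omega
    · have hcnt : List.count y [x] = 0 := List.count_eq_zero.2 (by simp only [List.mem_singleton]; exact hyx)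
      split_ifs with hc <;>
        simp only [PySem.Set.mem_add, ih, hcnt, hyx, or_false, add_zero]

-- two duplicate-free lists with the same members have the same length
lemma pv_length_eq_of_nodup_of_mem_iff {l1 l2 : List Int} (h1 : l1.Nodup) (h2 : l2.Nodup)
    (h : ∀ y, y ∈ l1 ↔ y ∈ l2) : l1.length = l2.length := by
  rw [← List.toFinset_card_of_nodup h1, ← List.toFinset_card_of_nodup h2]
  congr 1; ext y; simp [h y]

-- ===== VERDICT (by name: the statement is the Claim_ definition above) =====
theorem findPairs_2_spec : Claim_equal_findPairs_2 := by
  intro nums k _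
  unfold Spec_findPairs_2 findPairs_2_alt
  rw [findPairs_2_eq_countP]
  by_cases hneg : k < 0
  · rw [if_pos hneg]
    have hz : (PySem.Set.ofList nums).countP
        (fun y => decide ((0 < k ∧ y + k ∈ nums) ∨ (k = 0 ∧ 2 ≤ nums.count y))) = 0 := by
      apply List.countP_eq_zero.2
      intro y _
      simp only [decide_eq_true_eq]
      rintro (⟨h, _⟩ | ⟨h, _⟩) <;> omega
    rw [hz]; rfl
  · rw [if_neg hneg]
    have hlen : PySem.Set.len (nums.foldl (pvStep k) (PySem.Set.empty, PySem.Set.empty)).2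
        = ((nums.foldl (pvStep k) (PySem.Set.empty, PySem.Set.empty)).2.length : Int) := by
      simp [PySem.Set.len]
    rw [hlen, List.countP_eq_length_filter]
    congr 1
    apply pv_length_eq_of_nodup_of_mem_iff
    · exact (PySem.Set.nodup_ofList nums).filter _
    · exact pv_pairs_nodup k nums (PySem.Set.empty, PySem.Set.empty) List.nodup_nil
    · intro y
      rw [List.mem_filter]
      simp only [PySem.Set.mem_ofList, decide_eq_true_eq]
      by_cases hk : 0 < k
      · rw [pv_mem_pairs_pos k hk nums]
        have hne : ¬ k = 0 := by omega
        constructor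
        · rintro ⟨hy, ⟨_, h⟩ | ⟨h0, _⟩⟩
          · exact ⟨hy, h⟩
          · exact absurd h0 hne
        · rintro ⟨hy, hk2⟩
          exact ⟨hy, Or.inl ⟨hk, hk2⟩⟩
      · have hk0 : k = 0 := by omega
        subst hk0
        rw [pv_mem_pairs_zero nums]
        have himp : 2 ≤ nums.count y → y ∈ nums := by
          intro h; rw [← List.count_pos_iff]; omega
        constructor
        · rintro ⟨_, ⟨h0, _⟩ | ⟨_, h2⟩⟩
          · exact absurd h0 (by omega)
          · exact h2
        · intro h
          exact ⟨himp h, Or.inr ⟨rfl, h⟩⟩
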